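-- pv_equiv track=rewrite | github.com/tombryson/market-analyst-council | test_pdf_dump_worker_summaries.py | _auto_importance_floor_from_lanes
-- ===== SOURCE A (Python) =====
-- from typing import Any, Dict, List, Optional, Tuple
--
-- def _auto_importance_floor_from_lanes(lane_meta: Dict[str, Any]) -> int:
--     scores = dict(lane_meta.get("scores", {}) or {})
--     floor = 0
--     if int(scores.get("financing_capital", 0)) >= 70:
--         floor = max(floor, 78)
--     elif int(scores.get("financing_capital", 0)) >= 55:
--         floor = max(floor, 64)
--
--     if int(scores.get("regulatory_legal", 0)) >= 65:
--         floor = max(floor, 72)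
--
--     if int(scores.get("growth_pipeline", 0)) >= 72:
--         floor = max(floor, 68)
--     elif int(scores.get("growth_pipeline", 0)) >= 56:
--         floor = max(floor, 58)
--
--     if int(scores.get("operations_execution", 0)) >= 70:
--         floor = max(floor, 67)
--
--     if (
--         int(scores.get("timeline_milestones", 0)) >= 58
--         and int(scores.get("operations_execution", 0)) >= 48
--     ):
--         floor = max(floor, 62)
--
--     strong_lanes = sum(1 for v in scores.values() if int(v) >= 60)
--     if strong_lanes >= 2:
--         floor = max(floor, 70)
--     return int(max(0, min(95, floor)))
-- ===== SOURCE B (Python) =====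
-- # Priority decision list: floor values are checked from highest to lowest and the
-- # FIRST attainable one is returned immediately -- no max accumulation at all.
-- # Correct because the result of the task is the highest fired floor; the elif
-- # guards of A (fc<70 for 64, gp<72 for 58) are implied by not having returned earlier.
-- def _auto_importance_floor_from_lanes(lane_meta):
--     scores = dict(lane_meta.get("scores", {}) or {})
--     fc = int(scores.get("financing_capital", 0))
--     rl = int(scores.get("regulatory_legal", 0))
--     gp = int(scores.get("growth_pipeline", 0))
--     oe = int(scores.get("operations_execution", 0))
--     tm = int(scores.get("timeline_milestones", 0))
--     strong = sum(1 for v in scores.values() if int(v) >= 60)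
--     if fc >= 70:
--         return 78
--     if rl >= 65:
--         return 72
--     if strong >= 2:
--         return 70
--     if gp >= 72:
--         return 68
--     if oe >= 70:
--         return 67
--     if fc >= 55:
--         return 64
--     if tm >= 58 and oe >= 48:
--         return 62
--     if gp >= 56:
--         return 58
--     return 0
-- ===== Notes on version B (the rewrite author's own statement) =====
-- stated objective: alternative
-- what changed: Replaces A's running-max accumulator over an elif ladder by a priority decision list: the possible floors are tested in descending value order (78,72,70,68,67,64,62,58) and the first attainable one is returned immediately, so no max/clamp is computed at all; A's elif guards become implied by earlier early returns.
import Mathlib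
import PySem

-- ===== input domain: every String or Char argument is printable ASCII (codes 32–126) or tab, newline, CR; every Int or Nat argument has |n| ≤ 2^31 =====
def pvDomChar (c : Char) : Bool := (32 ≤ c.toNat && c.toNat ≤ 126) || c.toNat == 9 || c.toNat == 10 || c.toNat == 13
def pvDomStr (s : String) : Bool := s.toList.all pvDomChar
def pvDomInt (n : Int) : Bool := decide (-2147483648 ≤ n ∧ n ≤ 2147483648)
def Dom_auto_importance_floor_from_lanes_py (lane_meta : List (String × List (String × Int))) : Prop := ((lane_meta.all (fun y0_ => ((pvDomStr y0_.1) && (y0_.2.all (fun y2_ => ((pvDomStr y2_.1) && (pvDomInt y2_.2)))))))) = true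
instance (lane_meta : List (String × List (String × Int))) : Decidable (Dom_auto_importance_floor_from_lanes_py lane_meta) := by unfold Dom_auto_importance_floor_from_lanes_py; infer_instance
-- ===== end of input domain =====

-- B replaces A's running-max elif ladder by a priority decision list: floors tested in descending order, first attainable returned (objective: alternative).


-- ===== PORT A =====
def auto_importance_floor_from_lanes_py (lane_meta : List (String × List (String × Int))) : Int :=
  let scores : PySem.Dict String Int :=
    PySem.Dict.ofList ((PySem.Dict.mk lane_meta).getD "scores" [])
  let floor : Int := 0
  let floor := if scores.getD "financing_capital" 0 ≥ 70 then max floor 78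
               else if scores.getD "financing_capital" 0 ≥ 55 then max floor 64
               else floor
  let floor := if scores.getD "regulatory_legal" 0 ≥ 65 then max floor 72 else floor
  let floor := if scores.getD "growth_pipeline" 0 ≥ 72 then max floor 68
               else if scores.getD "growth_pipeline" 0 ≥ 56 then max floor 58
               else floor
  let floor := if scores.getD "operations_execution" 0 ≥ 70 then max floor 67 else floor
  let floor := if scores.getD "timeline_milestones" 0 ≥ 58 ∧ scores.getD "operations_execution" 0 ≥ 48
               then max floor 62 else floor
  let strong_lanes : Int := scores.values.foldl (fun acc v => acc + (if v ≥ 60 then 1 else 0)) 0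
  let floor := if strong_lanes ≥ 2 then max floor 70 else floor
  max 0 (min 95 floor)

-- ===== PORT B =====
-- B: priority decision list — test floors from highest to lowest, return the first attainable.
def auto_importance_floor_from_lanes_py_alt (lane_meta : List (String × List (String × Int))) : Int :=
  let scores : PySem.Dict String Int :=
    PySem.Dict.ofList ((PySem.Dict.mk lane_meta).getD "scores" [])
  let fc := scores.getD "financing_capital" 0
  let rl := scores.getD "regulatory_legal" 0
  let gp := scores.getD "growth_pipeline" 0
  let oe := scores.getD "operations_execution" 0
  let tm := scores.getD "timeline_milestones" 0
  let strong : Int := scores.values.foldl (fun acc v => acc + (if v ≥ 60 then 1 else 0)) 0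
  if fc ≥ 70 then 78
  else if rl ≥ 65 then 72
  else if strong ≥ 2 then 70
  else if gp ≥ 72 then 68
  else if oe ≥ 70 then 67
  else if fc ≥ 55 then 64
  else if tm ≥ 58 ∧ oe ≥ 48 then 62
  else if gp ≥ 56 then 58
  else 0

-- ===== PRECONDITION & SPEC =====
def Spec_auto_importance_floor_from_lanes_py (lane_meta : List (String × List (String × Int))) (out : Int) : Prop := out = auto_importance_floor_from_lanes_py_alt lane_meta
instance (lane_meta : List (String × List (String × Int))) (out : Int) : Decidable (Spec_auto_importance_floor_from_lanes_py lane_meta out) := by unfold Spec_auto_importance_floor_from_lanes_py; infer_instance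

-- ===== CLAIM (what is proved, stated in full; the proofs are below) =====
def Claim_equal_auto_importance_floor_from_lanes_py : Prop := ∀ (lane_meta : List (String × List (String × Int))), Dom_auto_importance_floor_from_lanes_py lane_meta → Spec_auto_importance_floor_from_lanes_py lane_meta (auto_importance_floor_from_lanes_py lane_meta)

-- ===== LEMMAS AND PROOFS =====

-- Both programs, after abstracting the five scores and the strong-lane count,
-- are pure integer case expressions; this lemma states they agree.
set_option maxHeartbeats 1000000 in
theorem pv_cases_eq (a b c e t n : Int) :
    (let floor : Int := 0
     let floor := if a ≥ 70 then max floor 78 else if a ≥ 55 then max floor 64 else floor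
     let floor := if b ≥ 65 then max floor 72 else floor
     let floor := if c ≥ 72 then max floor 68 else if c ≥ 56 then max floor 58 else floor
     let floor := if e ≥ 70 then max floor 67 else floor
     let floor := if t ≥ 58 ∧ e ≥ 48 then max floor 62 else floor
     let floor := if n ≥ 2 then max floor 70 else floor
     max 0 (min 95 floor)) =
    (if a ≥ 70 then (78:Int)
     else if b ≥ 65 then 72
     else if n ≥ 2 then 70
     else if c ≥ 72 then 68
     else if e ≥ 70 then 67
     else if a ≥ 55 then 64
     else if t ≥ 58 ∧ e ≥ 48 then 62
     else if c ≥ 56 then 58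
     else 0) := by
  split_ifs <;> (dsimp only; omega)

-- ===== VERDICT (by name: the statement is the Claim_ definition above) =====
theorem auto_importance_floor_from_lanes_py_spec : Claim_equal_auto_importance_floor_from_lanes_py := by
  intro lane_meta _
  unfold Spec_auto_importance_floor_from_lanes_py
  unfold auto_importance_floor_from_lanes_py auto_importance_floor_from_lanes_py_alt
  exact pv_cases_eq _ _ _ _ _ _
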